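-- pv_equiv track=rewrite | github.com/0oJimmyo0/Clinic-notes-entity-extraction | script/run_rq1_pathb_oracle_recall.py | _oracle_flags
-- ===== SOURCE A (Python) =====
-- from typing import Dict, List
--
-- def _oracle_flags(topk: List[str], gold: str, cutoffs: List[int]) -> Dict[str, bool]:
--     out: Dict[str, bool] = {}
--     if not gold:
--         for k in cutoffs:
--             out[f"hit_at_{k}"] = False
--         return out
--
--     for k in cutoffs:
--         out[f"hit_at_{k}"] = gold in topk[:k]
--     return out
-- ===== SOURCE B (Python) =====
-- from typing import Dict, List
--
-- def _oracle_flags(topk: List[str], gold: str, cutoffs: List[int]) -> Dict[str, bool]: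
--     # Find gold's first index once, then answer each cutoff in O(1).
--     idx = None
--     if gold:
--         for i, s in enumerate(topk):
--             if s == gold:
--                 idx = i
--                 break
--     n = len(topk)
--     out: Dict[str, bool] = {}
--     for k in cutoffs:
--         out[f"hit_at_{k}"] = idx is not None and idx < (k if k >= 0 else n + k)
--     return out
-- ===== Notes on version B (the rewrite author's own statement) =====
-- stated objective: faster
-- what changed: Instead of slicing topk and scanning it for gold at every cutoff, B finds gold's first index with a single scan and answers each cutoff with one index comparison (negative cutoffs handled by offsetting with len(topk)).
import Mathlib
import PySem

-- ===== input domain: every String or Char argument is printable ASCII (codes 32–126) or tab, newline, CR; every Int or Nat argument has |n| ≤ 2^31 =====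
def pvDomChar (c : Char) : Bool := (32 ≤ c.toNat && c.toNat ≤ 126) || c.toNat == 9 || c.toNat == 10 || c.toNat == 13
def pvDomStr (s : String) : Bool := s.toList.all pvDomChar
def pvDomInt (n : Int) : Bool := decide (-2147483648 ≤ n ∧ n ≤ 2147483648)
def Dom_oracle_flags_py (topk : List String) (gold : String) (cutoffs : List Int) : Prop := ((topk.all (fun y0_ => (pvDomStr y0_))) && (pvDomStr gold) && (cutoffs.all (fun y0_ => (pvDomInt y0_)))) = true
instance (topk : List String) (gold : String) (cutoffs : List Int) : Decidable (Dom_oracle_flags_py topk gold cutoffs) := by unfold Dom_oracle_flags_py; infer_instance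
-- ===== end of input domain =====

-- B replaces the per-cutoff list slice+scan by one scan finding gold's first index (O(n+|cutoffs|) vs O(|cutoffs|·n)).

-- ===== PORT A =====
-- dict out; per cutoff k: out[f"hit_at_{k}"] = gold in topk[:k] (False branch when gold is empty)
def oracle_flags_py (topk : List String) (gold : String) (cutoffs : List Int) : List (String × Bool) :=
  (if gold = "" then
    cutoffs.foldl (fun out k =>
      out.insert ("hit_at_" ++ PySem.Int.toStr k) false) (PySem.Dict.empty)
  else
    cutoffs.foldl (fun out k =>
      out.insert ("hit_at_" ++ PySem.Int.toStr k)
        ((PySem.List.slice topk none (some k)).contains gold)) (PySem.Dict.empty)).items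

-- ===== PORT B =====
-- the `for i, s in enumerate(topk): if s == gold: idx = i; break` loop
def pvFirstIdx (gold : String) : List String → Nat → Option Nat
  | [], _ => none
  | s :: rest, i => if s = gold then some i else pvFirstIdx gold rest (i + 1)

def oracle_flags_py_alt (topk : List String) (gold : String) (cutoffs : List Int) : List (String × Bool) :=
  let idx : Option Nat := if gold = "" then none else pvFirstIdx gold topk 0
  let n : Int := topk.length
  (cutoffs.foldl (fun out k =>
    out.insert ("hit_at_" ++ PySem.Int.toStr k)
      (match idx with
       | none => false
       | some i => decide ((i : Int) < (if 0 ≤ k then k else n + k)))) (PySem.Dict.empty)).items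

-- ===== PRECONDITION & SPEC =====
def Spec_oracle_flags_py (topk : List String) (gold : String) (cutoffs : List Int) (out : List (String × Bool)) : Prop := out = oracle_flags_py_alt topk gold cutoffs
instance (topk : List String) (gold : String) (cutoffs : List Int) (out : List (String × Bool)) : Decidable (Spec_oracle_flags_py topk gold cutoffs out) := by unfold Spec_oracle_flags_py; infer_instance

-- ===== CLAIM (what is proved, stated in full; the proofs are below) =====
def Claim_equal_oracle_flags_py : Prop := ∀ (topk : List String) (gold : String) (cutoffs : List Int), Dom_oracle_flags_py topk gold cutoffs → Spec_oracle_flags_py topk gold cutoffs (oracle_flags_py topk gold cutoffs)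

-- ===== LEMMAS AND PROOFS =====

-- the scan with accumulator i just offsets the scan started at 0
lemma pvFirstIdx_shift (gold : String) (xs : List String) (j : Nat) :
    pvFirstIdx gold xs j = (pvFirstIdx gold xs 0).map (· + j) := by
  induction xs generalizing j with
  | nil => rfl
  | cons x rest ih =>
    by_cases h : x = gold
    · simp [pvFirstIdx, h]
    · simp only [pvFirstIdx, if_neg h]
      rw [ih (j + 1), ih 1, Option.map_map]
      congr 1
      funext i
      simp
      omega

-- membership in a prefix is exactly "first index below the prefix length"
lemma contains_take_eq (gold : String) (xs : List String) (m : Nat) :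
    (xs.take m).contains gold =
      (match pvFirstIdx gold xs 0 with
       | none => false
       | some i => decide (i < m)) := by
  induction xs generalizing m with
  | nil => cases m <;> simp [pvFirstIdx]
  | cons x rest ih =>
    by_cases h : x = gold
    · cases m with
      | zero => simp [pvFirstIdx, h]
      | succ m' => simp [pvFirstIdx, h]
    · cases m with
      | zero =>
        simp only [List.take_zero, List.contains_eq_mem, List.not_mem_nil, decide_false,
          pvFirstIdx, if_neg h, pvFirstIdx_shift gold rest 1]
        cases pvFirstIdx gold rest 0 <;> simp
      | succ m' =>
        simp only [List.take_succ_cons, List.contains_cons, pvFirstIdx, if_neg h,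
          pvFirstIdx_shift gold rest 1, ih m']
        have hne : (x == gold) = false := by simp [h]
        cases pvFirstIdx gold rest 0 <;> simp [Ne.symm h]

-- per-cutoff flags agree (gold nonempty)
lemma flag_eq (topk : List String) (gold : String) (k : Int) :
    (PySem.List.slice topk none (some k)).contains gold =
      (match pvFirstIdx gold topk 0 with
       | none => false
       | some i => decide ((i : Int) < (if 0 ≤ k then k else (topk.length : Int) + k))) := by
  by_cases hk : 0 ≤ k
  · rw [PySem.List.slice_to topk hk, contains_take_eq]
    cases pvFirstIdx gold topk 0 with
    | none => rfl
    | some i => simp only [if_pos hk]; rcases k with n | n <;> simp <;> omega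
  · rw [not_le] at hk
    obtain ⟨m, hm, rfl⟩ : ∃ m : Nat, 0 < m ∧ k = -(m : Int) := by
      exact ⟨(-k).toNat, by omega, by omega⟩
    rw [PySem.List.slice_to_neg_natCast topk m hm, contains_take_eq]
    cases pvFirstIdx gold topk 0 with
    | none => rfl
    | some i => simp only [if_neg (by omega : ¬ (0:Int) ≤ -(m:Int))]; simp; omega

-- ===== VERDICT (by name: the statement is the Claim_ definition above) =====
theorem oracle_flags_py_spec : Claim_equal_oracle_flags_py := by
  intro topk gold cutoffs _
  unfold Spec_oracle_flags_py oracle_flags_py oracle_flags_py_alt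
  by_cases hg : gold = ""
  · simp [hg]
  · simp only [if_neg hg]
    congr 2
    funext out k
    rw [flag_eq]
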